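-- pv_equiv track=rewrite | github.com/pbielak/aoc2025 | day04/main.py | find_removable_rolls
-- ===== SOURCE A (Python) =====
-- InputData = list[str]
--
-- def find_removable_rolls(data: InputData) -> list[tuple[int, int]]:
--     rolls = []
--
--     for row in range(len(data)):
--         for col in range(len(data[0])):
--             if data[row][col] == ".":
--                 continue
--
--             adj = [
--                 data[row + dr][col + dc]
--                 for dr in (-1, 0, 1)
--                 for dc in (-1, 0, 1)
--                 if 0 <= row + dr < len(data)
--                 and 0 <= col + dc < len(data[0])
--                 and not (dr == 0 and dc == 0)
--             ]
--
--             if adj.count("@") < 4: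
--                 rolls.append((row, col))
--
--     return rolls
-- ===== SOURCE B (Python) =====
-- def find_removable_rolls(data):
--     n_rows = len(data)
--     n_cols = len(data[0]) if data else 0
--     counts = {}
--     for r in range(n_rows):
--         for c in range(n_cols):
--             if data[r][c] == "@":
--                 for dr in (-1, 0, 1):
--                     for dc in (-1, 0, 1):
--                         if (
--                             not (dr == 0 and dc == 0)
--                             and 0 <= r + dr < n_rows
--                             and 0 <= c + dc < n_cols
--                         ):
--                             pos = (r + dr, c + dc)
--                             counts[pos] = counts.get(pos, 0) + 1
--     return [
--         (r, c)
--         for r in range(n_rows)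
--         for c in range(n_cols)
--         if data[r][c] != "." and counts.get((r, c), 0) < 4
--     ]
-- ===== Notes on version B (the rewrite author's own statement) =====
-- stated objective: faster
-- what changed: A gathers the 8 in-bounds neighbours of every non-dot cell and counts '@' among them per cell; B instead makes one scatter pass that accumulates, in a dictionary keyed by position, how many '@' cells touch each position, then a second plain pass that emits the non-dot cells whose accumulated count is below 4.
import Mathlib
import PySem

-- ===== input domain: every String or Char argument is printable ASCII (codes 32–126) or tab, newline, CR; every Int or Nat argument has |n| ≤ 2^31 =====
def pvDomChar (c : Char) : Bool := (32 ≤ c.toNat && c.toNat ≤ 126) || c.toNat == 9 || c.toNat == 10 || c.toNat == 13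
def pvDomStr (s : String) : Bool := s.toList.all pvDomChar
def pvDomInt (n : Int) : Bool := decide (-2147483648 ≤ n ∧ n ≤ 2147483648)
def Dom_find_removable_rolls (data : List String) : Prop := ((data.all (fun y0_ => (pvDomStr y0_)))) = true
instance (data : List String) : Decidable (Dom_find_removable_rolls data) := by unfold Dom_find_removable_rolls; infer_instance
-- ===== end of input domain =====

-- B replaces A's per-cell gather of the 8 neighbours by a single scatter pass that counts, in a
-- dictionary keyed by position, how many '@' cells touch each position, then a plain check pass;
-- same asymptotic cost, measured constant-factor faster (work only per '@' cell in the scatter).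

-- ===== PORT A =====
-- the 9 (dr, dc) pairs of A's double comprehension 'for dr in (-1,0,1) for dc in (-1,0,1)'
def pvDeltas : List (Int × Int) :=
  [(-1,-1),(-1,0),(-1,1),(0,-1),(0,0),(0,1),(1,-1),(1,0),(1,1)]

-- data[r][c] (total form; Pre_ keeps every access Python performs in range)
def pvCell (data : List String) (r c : Int) : Char :=
  PySem.List.pyGetD (PySem.List.pyGetD data r "").toList c ' '

def find_removable_rolls (data : List String) : List (Int × Int) :=
  (PySem.List.pyRange 0 (PySem.List.len data) 1).foldl (fun rolls row =>
    (PySem.List.pyRange 0 (PySem.Str.len (PySem.List.pyGetD data 0 "")) 1).foldl (fun rolls col =>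
      if pvCell data row col = '.' then rolls
      else
        let adj := pvDeltas.foldl (fun adj d =>
          if 0 ≤ row + d.1 ∧ row + d.1 < PySem.List.len data ∧
             0 ≤ col + d.2 ∧ col + d.2 < PySem.Str.len (PySem.List.pyGetD data 0 "") ∧
             ¬(d.1 = 0 ∧ d.2 = 0)
          then adj ++ [pvCell data (row + d.1) (col + d.2)] else adj) []
        if (PySem.List.count adj '@' : Int) < 4 then rolls ++ [(row, col)] else rolls)
      rolls) []

-- ===== PORT B =====
def find_removable_rolls_alt (data : List String) : List (Int × Int) :=
  let nRows := PySem.List.len data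
  let nCols := if data = [] then 0 else PySem.Str.len (PySem.List.pyGetD data 0 "")
  let counts : PySem.Dict (Int × Int) Int :=
    (PySem.List.pyRange 0 nRows 1).foldl (fun d r =>
      (PySem.List.pyRange 0 nCols 1).foldl (fun d c =>
        if pvCell data r c = '@' then
          pvDeltas.foldl (fun d dd =>
            if ¬(dd.1 = 0 ∧ dd.2 = 0) ∧ 0 ≤ r + dd.1 ∧ r + dd.1 < nRows ∧
               0 ≤ c + dd.2 ∧ c + dd.2 < nCols
            then d.insert (r + dd.1, c + dd.2) (d.getD (r + dd.1, c + dd.2) 0 + 1)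
            else d) d
        else d) d) PySem.Dict.empty
  (PySem.List.pyRange 0 nRows 1).foldl (fun rolls r =>
    (PySem.List.pyRange 0 nCols 1).foldl (fun rolls c =>
      if pvCell data r c ≠ '.' ∧ counts.getD (r, c) 0 < 4 then rolls ++ [(r, c)]
      else rolls) rolls) []

-- ===== PRECONDITION & SPEC =====
-- Pre_ excludes exactly the inputs on which Python A raises IndexError: ragged grids
-- having a row shorter than the first row (data[row][col] with col < len(data[0])).
def Pre_find_removable_rolls (data : List String) : Prop :=
  ∀ s ∈ data, PySem.Str.len (PySem.List.pyGetD data 0 "") ≤ PySem.Str.len s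
instance (data : List String) : Decidable (Pre_find_removable_rolls data) := by
  unfold Pre_find_removable_rolls; infer_instance

def pvWitness_find_removable_rolls : List String := ["@.@", ".@.", "@@@"]

def Spec_find_removable_rolls (data : List String) (out : List (Int × Int)) : Prop :=
  out = find_removable_rolls_alt data
instance (data : List String) (out : List (Int × Int)) : Decidable (Spec_find_removable_rolls data out) := by
  unfold Spec_find_removable_rolls; infer_instance

-- ===== CLAIM (what is proved, stated in full; the proofs are below) =====
def Claim_equal_find_removable_rolls : Prop := ∀ (data : List String), Dom_find_removable_rolls data → Pre_find_removable_rolls data → Spec_find_removable_rolls data (find_removable_rolls data)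

-- ===== LEMMAS AND PROOFS =====

-- abbreviations for the grid bounds
def pvN (data : List String) : Int := PySem.List.len data
def pvM (data : List String) : Int := PySem.Str.len (PySem.List.pyGetD data 0 "")

-- the per-'@'-cell emission list of B's scatter pass
def pvEmit (data : List String) (r c : Int) : List (Int × Int) :=
  if pvCell data r c = '@' then
    (pvDeltas.filter (fun dd => decide (¬(dd.1 = 0 ∧ dd.2 = 0) ∧ 0 ≤ r + dd.1 ∧ r + dd.1 < pvN data ∧
        0 ≤ c + dd.2 ∧ c + dd.2 < pvM data))).map (fun dd => (r + dd.1, c + dd.2))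
  else []

-- all positions B's scatter pass increments, with multiplicity
def pvE (data : List String) : List (Int × Int) :=
  (PySem.List.pyRange 0 (pvN data) 1).flatMap (fun r =>
    (PySem.List.pyRange 0 (pvM data) 1).flatMap (fun c => pvEmit data r c))

-- 'if p x: acc = g acc (f x)' folded over a list is a fold of g over the filtered-mapped list
theorem pv_foldl_if_comp {α β γ : Type} (l : List α) (p : α → Prop) [DecidablePred p]
    (f : α → γ) (g : β → γ → β) (d : β) :
    l.foldl (fun d x => if p x then g d (f x) else d) d
      = ((l.filter (fun x => decide (p x))).map f).foldl g d := by
  induction l generalizing d with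
  | nil => rfl
  | cons a l ih =>
    by_cases h : p a <;> simp [h, ih]

-- a nested loop folding g is a fold of g over the flattened list
theorem pv_foldl_flat {α β γ : Type} (l : List α) (h : α → List γ) (g : β → γ → β) (d : β) :
    l.foldl (fun d x => (h x).foldl g d) d = (l.flatMap h).foldl g d := by
  induction l generalizing d with
  | nil => rfl
  | cons a l ih => simp [List.foldl_append, ih]

-- counting t in a filtered-mapped list as a 0/1 sum over the original list
theorem pv_count_filter_map {α β : Type} [BEq β] [LawfulBEq β] [DecidableEq β] (l : List α) (p : α → Prop)
    [DecidablePred p] (f : α → β) (t : β) :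
    List.count t ((l.filter (fun x => decide (p x))).map f)
      = (l.map (fun x => if p x ∧ f x = t then 1 else 0)).sum := by
  induction l with
  | nil => rfl
  | cons a l ih =>
    by_cases h : p a
    · by_cases hft : f a = t <;>
        simp [h, hft, ih, Nat.add_comm]
    · simp [h, ih]

-- summing the indicator of a single value over a duplicate-free list
theorem pv_sum_indicator (l : List Int) (hl : l.Nodup) (x : Int) :
    (l.map (fun y => if y = x then (1:ℕ) else 0)).sum = if x ∈ l then 1 else 0 := by
  induction l with
  | nil => simp
  | cons a l ih =>
    rcases List.nodup_cons.mp hl with ⟨ha, hl'⟩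
    by_cases hx : a = x
    · subst hx
      simp [ih hl', ha]
    · simp [hx, ih hl', Ne.symm hx]

-- a 0/1 sum over range(a,b) whose condition pins the index picks out at most one index
theorem pv_sum_pick (a b x : Int) (P : Int → Prop) [DecidablePred P] (f : Int → ℕ)
    (hf : ∀ y, f y = if y = x ∧ P y then 1 else 0) :
    ((PySem.List.pyRange a b 1).map f).sum = if a ≤ x ∧ x < b ∧ P x then 1 else 0 := by
  by_cases hP : P x
  · have hf2 : ∀ y ∈ PySem.List.pyRange a b 1, f y = (fun y => if y = x then (1:ℕ) else 0) y := by
      intro y _; rw [hf]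
      by_cases hy : y = x <;> simp [hy, hP]
    rw [List.map_congr_left hf2, pv_sum_indicator _ (PySem.List.nodup_pyRange_one a b) x]
    simp [PySem.List.mem_pyRange_one, hP]
  · have hf2 : ∀ y ∈ PySem.List.pyRange a b 1, f y = (fun _ => (0:ℕ)) y := by
      intro y _; rw [hf]
      by_cases hy : y = x
      · subst hy; simp [hP]
      · simp [hy]
    rw [List.map_congr_left hf2]
    simp [hP]

-- exchanging two nested 0/1 sums
theorem pv_sum_swap {α β : Type} (l : List α) (m : List β) (g : α → β → ℕ) :
    (l.map (fun x => ((m.map (g x)).sum))).sum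
      = (m.map (fun y => ((l.map (fun x => g x y)).sum))).sum := by
  induction l with
  | nil => simp
  | cons a l ih =>
    simp only [List.map_cons, List.sum_cons, ih]
    exact (List.sum_map_add).symm

-- the full per-emission condition: the source cell is '@', B's guard holds, and the target is (r, c)
abbrev pvCond (data : List String) (r c r2 c2 : Int) (dd : Int × Int) : Prop :=
  pvCell data r2 c2 = '@' ∧
  (¬(dd.1 = 0 ∧ dd.2 = 0) ∧ 0 ≤ r2 + dd.1 ∧ r2 + dd.1 < pvN data ∧
    0 ≤ c2 + dd.2 ∧ c2 + dd.2 < pvM data) ∧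
  ((r2 + dd.1, c2 + dd.2) : Int × Int) = (r, c)

-- a sum over the 9 deltas is invariant under negating the delta (negation reverses pvDeltas)
theorem pv_sum_map_neg (F : Int × Int → ℕ) :
    (pvDeltas.map (fun dd => F (-dd.1, -dd.2))).sum = (pvDeltas.map F).sum := by
  rw [show (fun dd : Int × Int => F (-dd.1, -dd.2))
        = F ∘ (fun dd : Int × Int => ((-dd.1, -dd.2) : Int × Int)) from rfl,
    ← List.map_map,
    show pvDeltas.map (fun dd : Int × Int => ((-dd.1, -dd.2) : Int × Int)) = pvDeltas.reverse
      from by decide,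
    List.map_reverse, List.sum_reverse]

-- B's counter value at an in-grid cell equals A's neighbour count there
theorem pv_cell_count (data : List String) (r c : Int)
    (hr0 : 0 ≤ r) (hr1 : r < pvN data) (hc0 : 0 ≤ c) (hc1 : c < pvM data) :
    List.count (r, c) (pvE data)
      = (pvDeltas.map (fun dd =>
          if (0 ≤ r + dd.1 ∧ r + dd.1 < pvN data ∧ 0 ≤ c + dd.2 ∧ c + dd.2 < pvM data ∧
              ¬(dd.1 = 0 ∧ dd.2 = 0)) ∧ pvCell data (r + dd.1) (c + dd.2) = '@'
          then 1 else 0)).sum := by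
  -- count in one cell's emission list, as a 0/1 sum over the deltas
  have hemit : ∀ r2 c2 : Int, List.count (r, c) (pvEmit data r2 c2)
      = (pvDeltas.map (fun dd => if pvCond data r c r2 c2 dd then (1:ℕ) else 0)).sum := by
    intro r2 c2
    by_cases hat : pvCell data r2 c2 = '@'
    · rw [pvEmit, if_pos hat]
      rw [pv_count_filter_map pvDeltas
          (fun dd => ¬(dd.1 = 0 ∧ dd.2 = 0) ∧ 0 ≤ r2 + dd.1 ∧ r2 + dd.1 < pvN data ∧
            0 ≤ c2 + dd.2 ∧ c2 + dd.2 < pvM data)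
          (fun dd => (r2 + dd.1, c2 + dd.2)) ((r, c) : Int × Int)]
      refine congrArg _ (List.map_congr_left ?_)
      intro dd _
      simp [pvCond, hat, and_assoc]
    · rw [pvEmit, if_neg hat]
      symm
      simp only [List.count_nil]
      rw [List.sum_eq_zero]
      intro i hi
      simp only [List.mem_map] at hi
      obtain ⟨dd, _, rfl⟩ := hi
      simp [pvCond, hat]
  rw [pvE, List.count_flatMap]
  simp only [Function.comp_def, List.count_flatMap]
  have step1 : ∀ r2 ∈ PySem.List.pyRange 0 (pvN data) 1,
      ((PySem.List.pyRange 0 (pvM data) 1).map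
          (fun c2 => List.count (r, c) (pvEmit data r2 c2))).sum
        = (pvDeltas.map (fun dd => ((PySem.List.pyRange 0 (pvM data) 1).map
            (fun c2 => if pvCond data r c r2 c2 dd then (1:ℕ) else 0)).sum)).sum := by
    intro r2 _
    rw [List.map_congr_left (fun c2 _ => hemit r2 c2)]
    exact pv_sum_swap _ _ _
  rw [List.map_congr_left step1, pv_sum_swap]
  -- pick the unique column, then the unique row, hit by a given delta
  have step2 : ∀ dd ∈ pvDeltas,
      ((PySem.List.pyRange 0 (pvN data) 1).map
          (fun r2 => ((PySem.List.pyRange 0 (pvM data) 1).map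
              (fun c2 => if pvCond data r c r2 c2 dd then (1:ℕ) else 0)).sum)).sum
        = if 0 ≤ r - dd.1 ∧ r - dd.1 < pvN data ∧
              (0 ≤ c - dd.2 ∧ c - dd.2 < pvM data ∧ pvCond data r c (r - dd.1) (c - dd.2) dd)
          then 1 else 0 := by
    intro dd _
    have hcol : ∀ r2 : Int,
        ((PySem.List.pyRange 0 (pvM data) 1).map
            (fun c2 => if pvCond data r c r2 c2 dd then (1:ℕ) else 0)).sum
          = if 0 ≤ c - dd.2 ∧ c - dd.2 < pvM data ∧ pvCond data r c r2 (c - dd.2) dd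
            then 1 else 0 := by
      intro r2
      refine pv_sum_pick 0 (pvM data) (c - dd.2) (fun c2 => pvCond data r c r2 c2 dd) _ ?_
      intro y
      by_cases hy : y = c - dd.2
      · simp [hy]
      · rw [if_neg, if_neg]
        · exact fun h => hy (by omega)
        · intro h
          have := h.2.2
          simp only [Prod.mk.injEq] at this
          exact hy (by omega)
    rw [List.map_congr_left (fun r2 _ => hcol r2)]
    refine pv_sum_pick 0 (pvN data) (r - dd.1)
      (fun r2 => 0 ≤ c - dd.2 ∧ c - dd.2 < pvM data ∧ pvCond data r c r2 (c - dd.2) dd) _ ?_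
    intro y
    by_cases hy : y = r - dd.1
    · simp [hy]
    · rw [if_neg, if_neg]
      · exact fun h => hy (by omega)
      · intro h
        have := h.2.2.2.2
        simp only [Prod.mk.injEq] at this
        exact hy (by omega)
  rw [List.map_congr_left step2]
  -- each counted delta corresponds to A's opposite delta
  have step3 : ∀ dd ∈ pvDeltas,
      (if 0 ≤ r - dd.1 ∧ r - dd.1 < pvN data ∧
            (0 ≤ c - dd.2 ∧ c - dd.2 < pvM data ∧ pvCond data r c (r - dd.1) (c - dd.2) dd)
        then (1:ℕ) else 0)
        = (fun dd : Int × Int =>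
            if (0 ≤ r + dd.1 ∧ r + dd.1 < pvN data ∧ 0 ≤ c + dd.2 ∧ c + dd.2 < pvM data ∧
                ¬(dd.1 = 0 ∧ dd.2 = 0)) ∧ pvCell data (r + dd.1) (c + dd.2) = '@'
            then 1 else 0) (-dd.1, -dd.2) := by
    intro dd _
    have h1 : r - dd.1 = r + -dd.1 := by ring
    have h2 : c - dd.2 = c + -dd.2 := by ring
    rw [h1, h2]
    refine if_congr ?_ rfl rfl
    unfold pvCond
    constructor
    · rintro ⟨p1, p2, p3, p4, hat, ⟨hctr, _, _, _, _⟩, _⟩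
      exact ⟨⟨p1, p2, p3, p4, by omega⟩, hat⟩
    · rintro ⟨⟨p1, p2, p3, p4, hctr⟩, hat⟩
      refine ⟨p1, p2, p3, p4, hat, ⟨by omega, by omega, by omega, by omega, by omega⟩, ?_⟩
      simp only [Prod.mk.injEq]
      omega
  rw [List.map_congr_left step3]
  exact pv_sum_map_neg (fun dd : Int × Int =>
    if (0 ≤ r + dd.1 ∧ r + dd.1 < pvN data ∧ 0 ≤ c + dd.2 ∧ c + dd.2 < pvM data ∧
        ¬(dd.1 = 0 ∧ dd.2 = 0)) ∧ pvCell data (r + dd.1) (c + dd.2) = '@'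
    then 1 else 0)

theorem pv_main (data : List String) :
    find_removable_rolls data = find_removable_rolls_alt data := by
  by_cases hne : data = []
  · subst hne; rfl
  simp only [find_removable_rolls, find_removable_rolls_alt, if_neg hne]
  -- B's scatter loop builds exactly the counter of the emission list pvE
  have hcounts : ((PySem.List.pyRange 0 (PySem.List.len data) 1).foldl (fun d r =>
      (PySem.List.pyRange 0 (PySem.Str.len (PySem.List.pyGetD data 0 "")) 1).foldl (fun d c =>
        if pvCell data r c = '@' then
          pvDeltas.foldl (fun d dd =>
            if ¬(dd.1 = 0 ∧ dd.2 = 0) ∧ 0 ≤ r + dd.1 ∧ r + dd.1 < PySem.List.len data ∧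
               0 ≤ c + dd.2 ∧ c + dd.2 < PySem.Str.len (PySem.List.pyGetD data 0 "")
            then d.insert (r + dd.1, c + dd.2) (d.getD (r + dd.1, c + dd.2) 0 + 1)
            else d) d
        else d) d) (PySem.Dict.empty : PySem.Dict (Int × Int) Int))
      = (pvE data).foldl (fun d x => d.insert x (d.getD x 0 + 1)) PySem.Dict.empty := by
    unfold pvE pvN pvM
    have hinner : ∀ (r : Int) (d : PySem.Dict (Int × Int) Int),
        ((PySem.List.pyRange 0 (PySem.Str.len (PySem.List.pyGetD data 0 "")) 1).foldl (fun d c =>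
          if pvCell data r c = '@' then
            pvDeltas.foldl (fun d dd =>
              if ¬(dd.1 = 0 ∧ dd.2 = 0) ∧ 0 ≤ r + dd.1 ∧ r + dd.1 < PySem.List.len data ∧
                 0 ≤ c + dd.2 ∧ c + dd.2 < PySem.Str.len (PySem.List.pyGetD data 0 "")
              then d.insert (r + dd.1, c + dd.2) (d.getD (r + dd.1, c + dd.2) 0 + 1)
              else d) d
          else d) d)
        = ((PySem.List.pyRange 0 (PySem.Str.len (PySem.List.pyGetD data 0 "")) 1).flatMap
              (fun c => pvEmit data r c)).foldl
            (fun d x => d.insert x (d.getD x 0 + 1)) d := by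
      intro r d
      rw [← pv_foldl_flat]
      refine PySem.List.foldl_congr_mem _ _ _ _ ?_
      intro d' c _
      by_cases hat : pvCell data r c = '@'
      · rw [if_pos hat, pvEmit, if_pos hat]
        exact pv_foldl_if_comp pvDeltas
          (fun dd => ¬(dd.1 = 0 ∧ dd.2 = 0) ∧ 0 ≤ r + dd.1 ∧ r + dd.1 < pvN data ∧
            0 ≤ c + dd.2 ∧ c + dd.2 < pvM data)
          (fun dd => (r + dd.1, c + dd.2))
          (fun d x => d.insert x (d.getD x 0 + 1)) d'
      · rw [if_neg hat, pvEmit, if_neg hat]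
        rfl
    refine Eq.trans (b := (PySem.List.pyRange 0 (PySem.List.len data) 1).foldl
        (fun (d : PySem.Dict (Int × Int) Int) r =>
          ((PySem.List.pyRange 0 (PySem.Str.len (PySem.List.pyGetD data 0 "")) 1).flatMap
            (fun c => pvEmit data r c)).foldl (fun d x => d.insert x (d.getD x 0 + 1)) d)
        PySem.Dict.empty) ?_ ?_
    · exact PySem.List.foldl_congr_mem _ _ _ _ (fun d r _ => hinner r d)
    · exact pv_foldl_flat (PySem.List.pyRange 0 (PySem.List.len data) 1)
        (fun r => (PySem.List.pyRange 0 (PySem.Str.len (PySem.List.pyGetD data 0 "")) 1).flatMap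
          (fun c => pvEmit data r c))
        (fun (d : PySem.Dict (Int × Int) Int) x => d.insert x (d.getD x 0 + 1)) PySem.Dict.empty
  rw [hcounts]
  refine PySem.List.foldl_congr_mem _ _ _ _ ?_
  intro rolls row hrow
  refine PySem.List.foldl_congr_mem _ _ _ _ ?_
  intro rolls' col hcol
  have hr := PySem.List.mem_pyRange_one.mp hrow
  have hc := PySem.List.mem_pyRange_one.mp hcol
  by_cases hdot : pvCell data row col = '.'
  · rw [if_pos hdot, if_neg (by simp [hdot])]
  · rw [if_neg hdot]
    have hadj : pvDeltas.foldl (fun adj dd =>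
        if 0 ≤ row + dd.1 ∧ row + dd.1 < PySem.List.len data ∧
           0 ≤ col + dd.2 ∧ col + dd.2 < PySem.Str.len (PySem.List.pyGetD data 0 "") ∧
           ¬(dd.1 = 0 ∧ dd.2 = 0)
        then adj ++ [pvCell data (row + dd.1) (col + dd.2)] else adj) ([] : List Char)
        = (pvDeltas.filter (fun dd => decide (0 ≤ row + dd.1 ∧ row + dd.1 < pvN data ∧
            0 ≤ col + dd.2 ∧ col + dd.2 < pvM data ∧ ¬(dd.1 = 0 ∧ dd.2 = 0)))).map
            (fun dd => pvCell data (row + dd.1) (col + dd.2)) := by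
      refine (pv_foldl_if_comp pvDeltas
        (fun dd => 0 ≤ row + dd.1 ∧ row + dd.1 < pvN data ∧
          0 ≤ col + dd.2 ∧ col + dd.2 < pvM data ∧ ¬(dd.1 = 0 ∧ dd.2 = 0))
        (fun dd => pvCell data (row + dd.1) (col + dd.2))
        (fun acc y => acc ++ [y]) []).trans ?_
      rw [PySem.List.foldl_append_singleton, List.nil_append]
    rw [hadj]
    have hcnt : PySem.List.count ((pvDeltas.filter (fun dd => decide (0 ≤ row + dd.1 ∧
          row + dd.1 < pvN data ∧ 0 ≤ col + dd.2 ∧ col + dd.2 < pvM data ∧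
          ¬(dd.1 = 0 ∧ dd.2 = 0)))).map (fun dd => pvCell data (row + dd.1) (col + dd.2)))
          '@'
        = List.count (row, col) (pvE data) := by
      rw [PySem.List.count_eq, pv_count_filter_map pvDeltas
        (fun dd => 0 ≤ row + dd.1 ∧ row + dd.1 < pvN data ∧
          0 ≤ col + dd.2 ∧ col + dd.2 < pvM data ∧ ¬(dd.1 = 0 ∧ dd.2 = 0))
        (fun dd => pvCell data (row + dd.1) (col + dd.2)) '@']
      exact (pv_cell_count data row col hr.1 hr.2 hc.1 hc.2).symm
    rw [hcnt, PySem.Dict.getD_foldl_insert_add_one]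
    have hzero : (PySem.Dict.empty : PySem.Dict (Int × Int) Int).getD (row, col) 0 = 0 := rfl
    rw [hzero, zero_add]
    refine if_congr ?_ rfl rfl
    exact ⟨fun h => ⟨hdot, h⟩, fun h => h.2⟩

-- ===== VERDICT (by name: the statement is the Claim_ definition above) =====
theorem find_removable_rolls_spec : Claim_equal_find_removable_rolls := by
  intro data _ _
  unfold Spec_find_removable_rolls
  exact pv_main data
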